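-- pv_equiv track=rewrite | github.com/YPChen1205/LeetCode | algorithms/dynamical_programming/perfect_square.py | gen_squares
-- ===== SOURCE A (Python) =====
-- def gen_squares(n):
--     square_list = []
--     diff = 3
--     square = 1
--     while square <= n:
--         square_list.append(square)
--         square += diff
--         diff += 2
--     return square_list
-- ===== SOURCE B (Python) =====
-- def gen_squares(n):
--     if n < 1:
--         return []
--     lo, hi = 1, n
--     while lo < hi:
--         mid = (lo + hi + 1) // 2
--         if mid * mid <= n:
--             lo = mid
--         else:
--             hi = mid - 1
--     return [i * i for i in range(1, lo + 1)]
-- ===== Notes on version B (the rewrite author's own statement) =====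
-- stated objective: alternative
-- what changed: Replaces A's single while loop that accumulates squares by adding successive odd differences with a binary search for the integer square root followed by a direct i*i comprehension over range(1, isqrt+1).
import Mathlib
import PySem

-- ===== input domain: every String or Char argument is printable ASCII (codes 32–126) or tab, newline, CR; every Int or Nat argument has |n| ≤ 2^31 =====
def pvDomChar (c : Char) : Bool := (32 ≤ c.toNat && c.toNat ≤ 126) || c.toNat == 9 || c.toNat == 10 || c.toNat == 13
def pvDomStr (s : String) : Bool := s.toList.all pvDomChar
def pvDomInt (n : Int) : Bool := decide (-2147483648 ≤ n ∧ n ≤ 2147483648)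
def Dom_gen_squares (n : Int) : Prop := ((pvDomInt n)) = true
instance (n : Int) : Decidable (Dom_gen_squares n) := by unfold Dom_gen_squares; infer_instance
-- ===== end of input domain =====

-- B replaces A's odd-difference accumulator loop with a binary search for the
-- integer square root followed by a direct i*i comprehension (objective: alternative).

-- ===== PORT A =====
-- the while loop of A: state (square, diff, square_list); hd keeps the loop terminating
def gsLoop (n square diff : Int) (acc : List Int) (hd : 1 ≤ diff) : List Int :=
  if h : square ≤ n then
    gsLoop n (square + diff) (diff + 2) (acc ++ [square]) (by omega)
  else acc
termination_by (n + 1 - square).toNat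
decreasing_by omega

def gen_squares (n : Int) : List Int := gsLoop n 1 3 [] (by norm_num)

-- ===== PORT B =====
-- the while loop of B: binary search for the largest lo with lo*lo ≤ n
def gsBS (n lo hi : Int) : Int :=
  if lo < hi then
    let mid := PySem.Int.floordiv (lo + hi + 1) 2
    if mid * mid ≤ n then gsBS n mid hi else gsBS n lo (mid - 1)
  else lo
termination_by (hi - lo).toNat
decreasing_by
  all_goals
    simp only [PySem.Int.floordiv] at *
    have h2 : Int.fdiv (lo + hi + 1) 2 = (lo + hi + 1) / 2 := by
      simp [Int.fdiv_eq_ediv]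
    omega

def gen_squares_alt (n : Int) : List Int :=
  if n < 1 then []
  else (PySem.List.pyRange 1 (gsBS n 1 n + 1) 1).map (fun i => i * i)

-- ===== PRECONDITION & SPEC =====
def Spec_gen_squares (n : Int) (out : List Int) : Prop := out = gen_squares_alt n
instance (n : Int) (out : List Int) : Decidable (Spec_gen_squares n out) := by unfold Spec_gen_squares; infer_instance

-- ===== CLAIM (what is proved, stated in full; the proofs are below) =====
def Claim_equal_gen_squares : Prop := ∀ (n : Int), Dom_gen_squares n → Spec_gen_squares n (gen_squares n)

-- ===== LEMMAS AND PROOFS =====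

-- the mathematical integer square root (proof-side characterisation only)
def S (n : Int) : Int := (Nat.sqrt n.toNat : Int)

lemma sq_le_iff (n i : Int) (hi : 1 ≤ i) : i * i ≤ n ↔ i ≤ S n := by
  unfold S
  by_cases hn : n ≤ 0
  · constructor
    · intro h; nlinarith
    · intro h
      have h0 : n.toNat = 0 := by omega
      rw [h0] at h; simp [Nat.sqrt] at h; omega
  · have hi0 : i = (i.toNat : Int) := by omega
    have hn0 : n = (n.toNat : Int) := by omega
    rw [hi0, hn0]
    rw [show ((i.toNat : Int) * (i.toNat : Int)) = ((i.toNat * i.toNat : Nat) : Int) by push_cast; ring]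
    rw [Int.ofNat_le, Int.ofNat_le]
    exact Iff.symm Nat.le_sqrt

lemma gsLoop_eq (n : Int) : ∀ (m : Nat) (i square diff : Int) (hd : 1 ≤ diff)
    (acc : List Int), 1 ≤ i → square = i * i → diff = 2 * i + 1 →
    (S n + 1 - i).toNat ≤ m →
    gsLoop n square diff acc hd =
      acc ++ (PySem.List.pyRange i (S n + 1) 1).map (fun j => j * j) := by
  intro m
  induction m with
  | zero =>
    intro i square diff hd acc h1 hsq hdf hm
    have hiS : S n + 1 ≤ i := by omega
    have : ¬ square ≤ n := by
      rw [hsq]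
      intro h
      have := (sq_le_iff n i h1).mp h
      omega
    rw [gsLoop, dif_neg this, PySem.List.pyRange_one_eq_nil hiS]
    simp
  | succ m ih =>
    intro i square diff hd acc h1 hsq hdf hm
    by_cases h : square ≤ n
    · have hiS : i ≤ S n := by
        have := (sq_le_iff n i h1).mp (by rw [← hsq]; exact h)
        omega
      rw [gsLoop, dif_pos h]
      rw [ih (i + 1) (square + diff) (diff + 2) (by omega) (acc ++ [square])
            (by omega) (by rw [hsq, hdf]; ring) (by rw [hdf]; ring) (by omega)]
      rw [PySem.List.pyRange_one_cons (by omega : i < S n + 1)]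
      simp [hsq]
    · have hiS : S n < i := by
        by_contra hc
        exact h (by rw [hsq]; exact (sq_le_iff n i h1).mpr (by omega))
      rw [gsLoop, dif_neg h, PySem.List.pyRange_one_eq_nil (by omega)]
      simp

lemma gsBS_eq (n : Int) : ∀ (m : Nat) (lo hi : Int), (hi - lo).toNat ≤ m →
    1 ≤ lo → lo ≤ S n → S n ≤ hi → gsBS n lo hi = S n := by
  intro m
  induction m with
  | zero =>
    intro lo hi hm h1 hlo hhi
    have : ¬ lo < hi := by omega
    rw [gsBS, if_neg this]; omega
  | succ m ih =>
    intro lo hi hm h1 hlo hhi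
    by_cases h : lo < hi
    · rw [gsBS, if_pos h]
      simp only [PySem.Int.floordiv]
      set mid := Int.fdiv (lo + hi + 1) 2 with hmid
      have hfd : mid = (lo + hi + 1) / 2 := by rw [hmid]; simp [Int.fdiv_eq_ediv]
      have hmid1 : lo < mid := by omega
      have hmid2 : mid ≤ hi := by omega
      by_cases hsq : mid * mid ≤ n
      · rw [if_pos hsq]
        exact ih mid hi (by omega) (by omega) ((sq_le_iff n mid (by omega)).mp hsq) hhi
      · rw [if_neg hsq]
        have : ¬ mid ≤ S n := fun hc => hsq ((sq_le_iff n mid (by omega)).mpr hc)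
        exact ih lo (mid - 1) (by omega) h1 hlo (by omega)
    · rw [gsBS, if_neg h]; omega

-- ===== VERDICT (by name: the statement is the Claim_ definition above) =====
theorem gen_squares_spec : Claim_equal_gen_squares := by
  intro n _
  unfold Spec_gen_squares gen_squares gen_squares_alt
  by_cases hn : n < 1
  · have hS : S n = 0 := by
      unfold S
      have : n.toNat = 0 := by omega
      simp [this]
    rw [gsLoop_eq n (S n + 1 - 1).toNat 1 1 3 (by norm_num) [] le_rfl (by ring) (by ring) le_rfl]
    rw [if_pos hn, hS, PySem.List.pyRange_one_eq_nil (by norm_num)]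
    simp
  · have hS1 : 1 ≤ S n := (sq_le_iff n 1 le_rfl).mp (by omega)
    have hSn : S n ≤ n := by
      unfold S
      have h1 : Nat.sqrt n.toNat ≤ n.toNat := Nat.sqrt_le_self _
      omega
    rw [if_neg hn]
    rw [gsBS_eq n (n - 1).toNat 1 n (by omega) le_rfl hS1 hSn]
    rw [gsLoop_eq n (S n + 1 - 1).toNat 1 1 3 (by norm_num) [] le_rfl (by ring) (by ring) le_rfl]
    simp
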